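-- pv_equiv track=rewrite | github.com/DongExxn/Algorithm | 프로그래머스/2/131704. 택배상자/택배상자.py | solution
-- ===== SOURCE A (Python) =====
-- def solution(order):
--     answer = 0
--     stack = []
--     idx = 0
--
--     for i in range(1, len(order) + 1):
--         if i == order[idx]:
--             answer += 1
--             idx += 1
--             # 스택에서 가능한 상자를 모두 트럭에 싣기
--             while stack and stack[-1] == order[idx]:
--                 stack.pop()
--                 answer += 1
--                 idx += 1
--         else:
--             stack.append(i)
--
--     return answer
-- ===== SOURCE B (Python) =====
-- def solution(order):
--     # Same count; loops over targets (order) instead of incoming boxes, pushing lazily.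
--     n = len(order)
--     answer = 0
--     stack = []
--     i = 1
--     for t in order:
--         while i <= n and (not stack or stack[-1] != t):
--             stack.append(i)
--             i += 1
--         if stack and stack[-1] == t:
--             stack.pop()
--             answer += 1
--         else:
--             break
--     return answer
-- ===== Notes on version B (the rewrite author's own statement) =====
-- stated objective: alternative
-- what changed: B drives the simulation by the wanted targets in `order` (lazily pushing arriving boxes until the top matches, popping once per target, breaking when stuck) instead of A's loop over the incoming box numbers with an inner pop-all while-loop.
import Mathlib
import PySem

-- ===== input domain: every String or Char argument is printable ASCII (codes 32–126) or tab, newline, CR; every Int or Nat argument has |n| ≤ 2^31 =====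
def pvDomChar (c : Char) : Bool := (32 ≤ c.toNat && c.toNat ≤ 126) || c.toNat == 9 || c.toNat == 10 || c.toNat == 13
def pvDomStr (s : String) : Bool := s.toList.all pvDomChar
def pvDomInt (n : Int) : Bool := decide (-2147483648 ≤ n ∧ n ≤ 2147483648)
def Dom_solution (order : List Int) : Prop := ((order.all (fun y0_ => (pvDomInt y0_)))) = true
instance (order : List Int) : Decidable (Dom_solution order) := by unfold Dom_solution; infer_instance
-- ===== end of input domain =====

-- B re-implements the stack simulation driven by the targets in `order` (lazy pushes)
-- instead of A's loop over the incoming box numbers; same exact count, alternative decomposition.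
-- Stacks are stored top-first (Python's stack[-1] = head, append = cons, pop = tail).

-- ===== PORT A =====
-- inner `while stack and stack[-1] == order[idx]: pop; answer+=1; idx+=1`
-- (idx is provably in range whenever Python evaluates order[idx], so pyGetD's default 0
--  is never the compared value on any reachable state: pushed boxes are ≥ 1)
def solutionChain (order : List Int) (answer : Int) (stack : List Int) (idx : Int) :
    Int × List Int × Int :=
  match stack with
  | [] => (answer, [], idx)
  | top :: rest =>
      if top = PySem.List.pyGetD order idx 0 then
        solutionChain order (answer + 1) rest (idx + 1)
      else (answer, top :: rest, idx)

def solutionStep (order : List Int) (st : Int × List Int × Int) (i : Int) :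
    Int × List Int × Int :=
  let (answer, stack, idx) := st
  if i = PySem.List.pyGetD order idx 0 then
    solutionChain order (answer + 1) stack (idx + 1)
  else (answer, i :: stack, idx)

def solution (order : List Int) : Int :=
  ((PySem.List.pyRange 1 ((order.length : Int) + 1) 1).foldl
      (solutionStep order) (0, [], 0)).1

-- ===== PORT B =====
-- `while i <= n and (not stack or stack[-1] != t): stack.append(i); i += 1`
def solutionDig (n i : Int) (stack : List Int) (t : Int) : List Int × Int :=
  if h : i ≤ n ∧ (stack = [] ∨ stack.head? ≠ some t) then
    solutionDig n (i + 1) (i :: stack) t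
  else (stack, i)
termination_by (n + 1 - i).toNat
decreasing_by omega

def solutionGo (n : Int) (ts : List Int) (answer : Int) (stack : List Int) (i : Int) : Int :=
  match ts with
  | [] => answer
  | t :: rest =>
      let (stack', i') := solutionDig n i stack t
      match stack' with
      | top :: below =>
          if top = t then solutionGo n rest (answer + 1) below i' else answer
      | [] => answer

def solution_alt (order : List Int) : Int :=
  solutionGo (order.length : Int) order 0 [] 1

-- ===== PRECONDITION & SPEC =====
def Spec_solution (order : List Int) (out : Int) : Prop := out = solution_alt order
instance (order : List Int) (out : Int) : Decidable (Spec_solution order out) := by unfold Spec_solution; infer_instance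

-- ===== CLAIM (what is proved, stated in full; the proofs are below) =====
def Claim_equal_solution : Prop := ∀ (order : List Int), Dom_solution order → Spec_solution order (solution order)

-- ===== LEMMAS AND PROOFS =====

-- out-of-range (nonnegative) index: pyGetD yields the default
theorem pvGetD_oob (order : List Int) (answer : Int) (h0 : 0 ≤ answer)
    (hge : (order.length : Int) ≤ answer) : PySem.List.pyGetD order answer 0 = 0 := by
  unfold PySem.List.pyGetD PySem.List.pyGet? PySem.List.pyIdx?
  rw [if_pos h0, if_neg (by omega)]
  rfl

-- the stopping condition: after the chain, the top (if any) differs from the next target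
theorem solutionChain_spec (order : List Int) :
    ∀ (stack : List Int) (answer : Int),
      (solutionChain order answer stack answer).2.2 = (solutionChain order answer stack answer).1 ∧
      ((solutionChain order answer stack answer).2.1 = [] ∨
        (solutionChain order answer stack answer).2.1.head? ≠
          some (PySem.List.pyGetD order (solutionChain order answer stack answer).1 0)) ∧
      (∀ x ∈ (solutionChain order answer stack answer).2.1, x ∈ stack) := by
  intro stack
  induction stack with
  | nil => intro answer; simp [solutionChain]
  | cons top rest ih =>
      intro answer
      by_cases hc : top = PySem.List.pyGetD order answer 0
      · simp only [solutionChain, if_pos hc]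
        obtain ⟨h1, h2, h3⟩ := ih (answer + 1)
        exact ⟨h1, h2, fun x hx => List.mem_cons_of_mem _ (h3 x hx)⟩
      · constructor
        · simp [solutionChain, if_neg hc]
        constructor
        · right
          simp only [solutionChain, if_neg hc]
          simpa using hc
        · intro x hx
          simpa [solutionChain, if_neg hc] using hx

-- a matching top lets B pop without pushing, mirroring one step of A's while-chain
theorem solutionGo_chain (order : List Int) (i : Int) :
    ∀ (stack : List Int) (answer : Int), 0 ≤ answer → (∀ x ∈ stack, 1 ≤ x) →
      solutionGo (order.length : Int) (order.drop answer.toNat) answer stack i =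
      solutionGo (order.length : Int)
        (order.drop (solutionChain order answer stack answer).1.toNat)
        (solutionChain order answer stack answer).1
        (solutionChain order answer stack answer).2.1 i := by
  intro stack
  induction stack with
  | nil => intro answer _ _; simp [solutionChain]
  | cons top rest ih =>
      intro answer h0 hpos
      by_cases hc : top = PySem.List.pyGetD order answer 0
      · -- the chain pops: answer must be in range (top ≥ 1 ≠ default 0)
        have htop : (1 : Int) ≤ top := hpos top (List.mem_cons_self)
        have hlt : answer.toNat < order.length := by
          by_contra hge
          have := pvGetD_oob order answer h0 (by omega)
          omega
        have hdrop : order.drop answer.toNat =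
            order[answer.toNat] :: order.drop (answer.toNat + 1) :=
          List.drop_eq_getElem_cons hlt
        have hget : PySem.List.pyGetD order answer 0 = order[answer.toNat] := by
          rw [PySem.List.pyGetD_eq_getElem order 0 h0 (by omega)]
        -- B's dig is a no-op (top = t), B pops
        have hdig : solutionDig (order.length : Int) i (top :: rest) order[answer.toNat]
            = (top :: rest, i) := by
          rw [solutionDig]
          rw [dif_neg]
          push_neg
          intro _
          constructor
          · simp
          · simp only [List.head?_cons, ne_eq, Option.some.injEq, not_not]
            rw [hc, hget]
        rw [hdrop]
        simp only [solutionGo, hdig]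
        rw [if_pos (by rw [hc, hget])]
        have h1 : (answer + 1).toNat = answer.toNat + 1 := by omega
        rw [← h1]
        rw [ih (answer + 1) (by omega) (fun x hx => hpos x (List.mem_cons_of_mem _ hx))]
        simp only [solutionChain, if_pos hc]
      · simp [solutionChain, if_neg hc]

-- B's dig pushes the arriving box when its top differs from the target
theorem solutionDig_step (n i : Int) (stack : List Int) (t : Int)
    (hi : i ≤ n) (hs : stack = [] ∨ stack.head? ≠ some t) :
    solutionDig n i stack t = solutionDig n (i + 1) (i :: stack) t := by
  rw [solutionDig]
  rw [dif_pos ⟨hi, hs⟩]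

-- main bisimulation: A's fold over the remaining arrivals equals B's run over the
-- remaining targets, from any synchronized state
theorem solution_bisim (order : List Int) :
    ∀ (k : Nat) (i answer : Int) (stack : List Int),
      i = (order.length : Int) + 1 - (k : Int) →
      1 ≤ i → 0 ≤ answer →
      (stack = [] ∨ stack.head? ≠ some (PySem.List.pyGetD order answer 0)) →
      (∀ x ∈ stack, 1 ≤ x) →
      ((PySem.List.pyRange i ((order.length : Int) + 1) 1).foldl
          (solutionStep order) (answer, stack, answer)).1 =
        solutionGo (order.length : Int) (order.drop answer.toNat) answer stack i := by
  intro k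
  induction k with
  | zero =>
      intro i answer stack hk hi h0 h1 hpos
      -- no arrivals left: i = n + 1
      have hrange : PySem.List.pyRange i ((order.length : Int) + 1) 1 = [] := by
        exact PySem.List.pyRange_one_eq_nil (by omega)
      rw [hrange]
      simp only [List.foldl_nil]
      rcases Nat.lt_or_ge answer.toNat order.length with hlt | hge
      · have hdrop : order.drop answer.toNat =
            order[answer.toNat] :: order.drop (answer.toNat + 1) :=
          List.drop_eq_getElem_cons hlt
        have hget : PySem.List.pyGetD order answer 0 = order[answer.toNat] := by
          rw [PySem.List.pyGetD_eq_getElem order 0 h0 (by omega)]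
        rw [hdrop]
        simp only [solutionGo]
        have hdig : solutionDig (order.length : Int) i stack order[answer.toNat]
            = (stack, i) := by
          rw [solutionDig]; rw [dif_neg]; push_neg; intro hle; omega
        rw [hdig]
        rcases h1 with he | hne
        · subst he; rfl
        · cases stack with
          | nil => rfl
          | cons top rest =>
              simp only
              rw [if_neg]
              intro hEq
              exact hne (by simp [hEq, hget])
      · rw [List.drop_eq_nil_of_le hge]
        rfl
  | succ k ih =>
      intro i answer stack hk hi h0 h1 hpos
      have hiLe : i ≤ (order.length : Int) := by omega
      have hrange : PySem.List.pyRange i ((order.length : Int) + 1) 1 =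
          i :: PySem.List.pyRange (i + 1) ((order.length : Int) + 1) 1 := by
        exact PySem.List.pyRange_one_cons (by omega)
      rw [hrange]
      simp only [List.foldl_cons]
      by_cases hc : i = PySem.List.pyGetD order answer 0
      · -- arrival matches the next target
        have hlt : answer.toNat < order.length := by
          by_contra hge
          have := pvGetD_oob order answer h0 (by omega)
          omega
        have hget : PySem.List.pyGetD order answer 0 = order[answer.toNat] := by
          rw [PySem.List.pyGetD_eq_getElem order 0 h0 (by omega)]
        have hdrop : order.drop answer.toNat =
            order[answer.toNat] :: order.drop (answer.toNat + 1) :=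
          List.drop_eq_getElem_cons hlt
        -- A's step
        have hstep : solutionStep order (answer, stack, answer) i =
            solutionChain order (answer + 1) stack (answer + 1) := by
          simp only [solutionStep, if_pos hc]
        rw [hstep]
        -- B's side: dig pushes i then stops (new top = i = t), pops it
        have hdig : solutionDig (order.length : Int) i stack order[answer.toNat]
            = (i :: stack, i + 1) := by
          rw [solutionDig_step _ _ _ _ hiLe (by rw [← hget]; exact h1)]
          rw [solutionDig]
          rw [dif_neg]
          push_neg
          intro _
          refine ⟨by simp, ?_⟩
          simp only [List.head?_cons, ne_eq, Option.some.injEq, not_not]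
          rw [hc, hget]
        rw [hdrop]
        simp only [solutionGo, hdig]
        rw [if_pos (by rw [hc, hget])]
        have h1' : (answer + 1).toNat = answer.toNat + 1 := by omega
        rw [← h1']
        rw [solutionGo_chain order (i + 1) stack (answer + 1) (by omega)
              (fun x hx => hpos x hx)]
        obtain ⟨hcx, hch1, hch3⟩ := solutionChain_spec order stack (answer + 1)
        rcases hres : solutionChain order (answer + 1) stack (answer + 1) with ⟨a2, s2, x2⟩
        rw [hres] at hcx hch1 hch3
        simp only at hcx hch1 hch3
        subst hcx
        have hx0 : 0 ≤ x2 := by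
          -- the chain only increments answer
          clear hch1 hch3 hrange hstep hdig hdrop
          have : ∀ (st : List Int) (a x : Int), 0 ≤ a →
              0 ≤ (solutionChain order a st x).1 := by
            intro st
            induction st with
            | nil => intro a x ha; simpa [solutionChain] using ha
            | cons p r ihc =>
                intro a x ha
                by_cases hp : p = PySem.List.pyGetD order x 0
                · simp only [solutionChain, if_pos hp]; exact ihc _ _ (by omega)
                · simpa [solutionChain, if_neg hp] using ha
          have := this stack (answer + 1) (answer + 1) (by omega)
          rw [hres] at this
          exact this
        exact ih (i + 1) x2 s2 (by omega) (by omega) hx0 hch1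
          (fun x hx => hpos x (hch3 x hx))
      · -- arrival does not match: A pushes it; B's dig pushes it too
        have hstep : solutionStep order (answer, stack, answer) i =
            (answer, i :: stack, answer) := by
          simp only [solutionStep, if_neg hc]
        rw [hstep]
        have hBside : solutionGo (order.length : Int) (order.drop answer.toNat)
              answer stack i =
            solutionGo (order.length : Int) (order.drop answer.toNat)
              answer (i :: stack) (i + 1) := by
          rcases Nat.lt_or_ge answer.toNat order.length with hlt | hge
          · have hget : PySem.List.pyGetD order answer 0 = order[answer.toNat] := by
              rw [PySem.List.pyGetD_eq_getElem order 0 h0 (by omega)]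
            have hdrop : order.drop answer.toNat =
                order[answer.toNat] :: order.drop (answer.toNat + 1) :=
              List.drop_eq_getElem_cons hlt
            rw [hdrop]
            simp only [solutionGo]
            rw [solutionDig_step _ _ _ _ hiLe (by rw [← hget]; exact h1)]
          · rw [List.drop_eq_nil_of_le hge]
            rfl
        rw [hBside]
        exact ih (i + 1) answer (i :: stack) (by omega) (by omega) h0
          (Or.inr (by simp only [List.head?_cons, ne_eq, Option.some.injEq]; exact hc))
          (by intro x hx; rcases List.mem_cons.mp hx with h | h
              · omega
              · exact hpos x h)

-- ===== VERDICT (by name: the statement is the Claim_ definition above) =====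
theorem solution_spec : Claim_equal_solution := by
  intro order _
  unfold Spec_solution solution solution_alt
  have := solution_bisim order order.length 1 0 [] (by omega) (by omega) (by omega)
    (Or.inl rfl) (by intro x hx; cases hx)
  simpa using this
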